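-- pv_equiv track=rewrite | github.com/weiyangzen/awesome_algorithms | Algorithms/数学-计算拓扑-0248-Smith标准形_-_拓扑应用/demo.py | determinantal_divisor
-- ===== SOURCE A (Python) =====
-- import itertools
-- import math
-- from typing import Iterable, Sequence
--
-- Matrix = list[list[int]]
--
-- def matrix_shape(matrix: Matrix) -> tuple[int, int]:
--     if not matrix:
--         return (0, 0)
--     return (len(matrix), len(matrix[0]))
--
-- def det_bareiss(square: Matrix) -> int:
--     """Exact determinant using Bareiss fraction-free elimination."""
--     n = len(square)
--     if n == 0:
--         return 1
--     if any(len(row) != n for row in square):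
--         raise ValueError("det_bareiss expects a square matrix.")
--
--     a = [row[:] for row in square]
--     sign = 1
--     prev = 1
--
--     for k in range(n - 1):
--         if a[k][k] == 0:
--             swap_row = None
--             for r in range(k + 1, n):
--                 if a[r][k] != 0:
--                     swap_row = r
--                     break
--             if swap_row is None:
--                 return 0
--             a[k], a[swap_row] = a[swap_row], a[k]
--             sign *= -1
--
--         pivot = a[k][k]
--         for i in range(k + 1, n):
--             for j in range(k + 1, n):
--                 numerator = a[i][j] * pivot - a[i][k] * a[k][j]
--                 a[i][j] = numerator // prev
--
--         prev = pivot
--         for i in range(k + 1, n):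
--             a[i][k] = 0
--
--     return sign * a[n - 1][n - 1]
--
-- def k_by_k_submatrix(matrix: Matrix, row_ids: Iterable[int], col_ids: Iterable[int]) -> Matrix:
--     rows = list(row_ids)
--     cols = list(col_ids)
--     return [[matrix[r][c] for c in cols] for r in rows]
--
-- def determinantal_divisor(matrix: Matrix, k: int) -> int:
--     """Compute Delta_k = gcd of all k x k minors' determinants."""
--     if k == 0:
--         return 1
--
--     m, n = matrix_shape(matrix)
--     if k > m or k > n:
--         return 0
--
--     g = 0
--     for row_ids in itertools.combinations(range(m), k):
--         for col_ids in itertools.combinations(range(n), k):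
--             minor = k_by_k_submatrix(matrix, row_ids, col_ids)
--             det = abs(det_bareiss(minor))
--             g = math.gcd(g, det)
--             if g == 1:
--                 return 1
--     return g
-- ===== SOURCE B (Python) =====
-- import math
--
-- def determinantal_divisor(matrix, k):
--     """Delta_k = gcd of all k x k minor determinants.  Index subsets are
--     enumerated by growing a powerset left-to-right and filtering for size k
--     (no itertools), each minor determinant comes from a pure recursive
--     fraction-free condensation (no in-place elimination), and the gcd is a
--     single flat fold over the list of determinants (no early exit)."""
--     if k == 0:
--         return 1
--     m = len(matrix)
--     n = len(matrix[0]) if matrix else 0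
--     if k > m or k > n:
--         return 0
--
--     def sized(pool):
--         # all subsets of pool (as increasing index lists), then keep size k
--         subs = [[]]
--         for x in pool:
--             subs = subs + [s + [x] for s in subs]
--         return [s for s in subs if len(s) == k]
--
--     def cond_det(a, prev):
--         # recursive Bareiss/Chio condensation, fraction-free, pure
--         if len(a) == 1:
--             return a[0][0]
--         p = a[0][0]
--         if p == 0:
--             for r in range(1, len(a)):
--                 if a[r][0] != 0:
--                     swapped = [a[r]] + a[1:r] + [a[0]] + a[r + 1:]
--                     return -cond_det(swapped, prev)
--             return 0
--         nxt = [[(p * row[j] - row[0] * a[0][j]) // prev for j in range(1, len(a))]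
--                for row in a[1:]]
--         return cond_det(nxt, p)
--
--     dets = [cond_det([[matrix[r][c] for c in cols] for r in rows], 1)
--             for rows in sized(range(m))
--             for cols in sized(range(n))]
--     g = 0
--     for d in dets:
--         g = math.gcd(g, d)
--     return g
-- ===== Notes on version B (the rewrite author's own statement) =====
-- stated objective: alternative
-- what changed: Same mathematics (gcd over all k-by-k minor determinants) by a different route: B grows the full powerset of indices left-to-right and filters for size k instead of itertools.combinations, computes each determinant by a pure recursive fraction-free condensation producing fresh lists instead of the in-place iterative Bareiss elimination, and takes one flat gcd fold over the list of all determinants with no early-exit returns.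
-- outside the precondition, e.g. on determinantal_divisor([[1, 2], [3]], 1): A returns 1, B raises IndexError
import Mathlib
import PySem

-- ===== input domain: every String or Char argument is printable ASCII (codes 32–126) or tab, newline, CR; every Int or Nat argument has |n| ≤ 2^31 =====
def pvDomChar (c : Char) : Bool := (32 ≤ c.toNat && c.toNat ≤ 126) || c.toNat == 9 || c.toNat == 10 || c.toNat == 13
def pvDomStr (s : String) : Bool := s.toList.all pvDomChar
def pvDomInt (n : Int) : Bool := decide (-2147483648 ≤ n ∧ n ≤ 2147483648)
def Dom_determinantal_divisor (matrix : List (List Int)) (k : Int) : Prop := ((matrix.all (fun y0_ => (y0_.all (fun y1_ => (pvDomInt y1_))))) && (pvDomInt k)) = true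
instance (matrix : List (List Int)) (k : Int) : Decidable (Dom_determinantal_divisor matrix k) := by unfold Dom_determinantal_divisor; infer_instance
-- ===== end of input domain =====

-- A and B agree on all admitted inputs; B enumerates index subsets by filtering a
-- powerset (not itertools.combinations), computes each minor determinant by a pure
-- recursive fraction-free condensation (not in-place Bareiss elimination), and takes
-- one flat gcd fold with no early exit (same values, different algorithmic route).

-- ===== PORT A =====

/-- `xs[i]` for an index known to be in range in Python (default is never read). -/
def pvGete (l : List Int) (i : Nat) : Int := l.getD i 0

/-- `a[i]` (a row) for an index known to be in range in Python. -/
def pvGetr (a : List (List Int)) (i : Nat) : List Int := a.getD i []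

/-- port of `matrix_shape`. -/
def pvMatrixShape (matrix : List (List Int)) : Int × Int :=
  if matrix = [] then (0, 0) else ((matrix.length : Int), ((matrix.headD []).length : Int))

/-- the inner double loop `for i in range(k+1,n): for j in range(k+1,n): a[i][j] = ... // prev`
    (pure element-wise update of the same entries with the same values). -/
def pvElimStep (a : List (List Int)) (k : Nat) (pivot prev : Int) : List (List Int) :=
  a.mapIdx (fun i row =>
    if k < i then
      row.mapIdx (fun j x =>
        if k < j then PySem.Int.floordiv (x * pivot - pvGete row k * pvGete (pvGetr a k) j) prev
        else x)
    else row)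

/-- `for i in range(k+1,n): a[i][k] = 0`. -/
def pvZeroCol (a : List (List Int)) (k : Nat) : List (List Int) :=
  a.mapIdx (fun i row => if k < i then row.set k 0 else row)

/-- `a[k], a[r] = a[r], a[k]` (both right-hand values read before writing). -/
def pvSwap (a : List (List Int)) (i j : Nat) : List (List Int) :=
  (a.set i (pvGetr a j)).set j (pvGetr a i)

/-- `for r in range(k+1, n): if a[r][k] != 0: swap_row = r; break`. -/
def pvFindSwap (a : List (List Int)) (k : Nat) : Option Int :=
  (PySem.List.pyRange ((k : Int) + 1) (a.length : Int) 1).find?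
    (fun r => pvGete (pvGetr a r.toNat) k != 0)

/-- the loop `for k in range(n-1)` of `det_bareiss`; `steps` counts the remaining
    iterations, `return 0` is the `swap_row is None` exit. -/
def pvBarLoop : Nat → Nat → List (List Int) → Int → Int → Int
  | 0, _, a, sign, _ => sign * pvGete (pvGetr a (a.length - 1)) (a.length - 1)
  | steps + 1, k, a, sign, prev =>
    if pvGete (pvGetr a k) k = 0 then
      match pvFindSwap a k with
      | none => 0
      | some r =>
        let a' := pvSwap a k r.toNat
        let pivot := pvGete (pvGetr a' k) k
        pvBarLoop steps (k + 1) (pvZeroCol (pvElimStep a' k pivot prev) k) (-sign) pivot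
    else
      let pivot := pvGete (pvGetr a k) k
      pvBarLoop steps (k + 1) (pvZeroCol (pvElimStep a k pivot prev) k) sign pivot

/-- port of `det_bareiss`.  The non-square branch is Python's `raise ValueError`;
    it is unreachable from `determinantal_divisor`, whose minors are always square. -/
def pvDetBareiss (square : List (List Int)) : Int :=
  if square.length = 0 then 1
  else if square.any (fun row => row.length ≠ square.length) then 0
  else pvBarLoop (square.length - 1) 0 square 1 1

/-- port of `itertools.combinations` on a list of indices: the same tuples in the
    same (lexicographic) order. -/
def pvCombos : List Int → Nat → List (List Int)
  | _, 0 => [[]]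
  | [], _ + 1 => []
  | x :: xs, r + 1 => (pvCombos xs r).map (fun c => x :: c) ++ pvCombos xs (r + 1)

/-- port of `k_by_k_submatrix`. -/
def pvKSub (matrix : List (List Int)) (rows cols : List Int) : List (List Int) :=
  rows.map (fun r => cols.map (fun c => pvGete (pvGetr matrix r.toNat) c.toNat))

/-- the inner `for col_ids in ...` loop; `.inl v` = the early `return 1`. -/
def pvACols (matrix : List (List Int)) (rows : List Int) : List (List Int) → Int → Sum Int Int
  | [], g => .inr g
  | cols :: rest, g =>
    let det : Int := ((pvDetBareiss (pvKSub matrix rows cols)).natAbs : Int)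
    let g' : Int := (Int.gcd g det : Int)
    if g' = 1 then .inl 1 else pvACols matrix rows rest g'

/-- the outer `for row_ids in ...` loop. -/
def pvARows (matrix : List (List Int)) (colsAll : List (List Int)) : List (List Int) → Int → Int
  | [], g => g
  | rows :: rest, g =>
    match pvACols matrix rows colsAll g with
    | .inl v => v
    | .inr g' => pvARows matrix colsAll rest g'

def determinantal_divisor (matrix : List (List Int)) (k : Int) : Int :=
  if k = 0 then 1
  else
    let mn := pvMatrixShape matrix
    if k > mn.1 ∨ k > mn.2 then 0
    else pvARows matrix (pvCombos (PySem.List.pyRange 0 mn.2 1) k.toNat)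
          (pvCombos (PySem.List.pyRange 0 mn.1 1) k.toNat) 0

-- ===== PORT B =====

/-- `[(p*row[j] - row[0]*a[0][j]) // prev for j in range(1, len(a))] for row in a[1:]`. -/
def pvChioNext (a : List (List Int)) (p prev : Int) : List (List Int) :=
  (PySem.List.slice a (some 1) none).map (fun row =>
    (PySem.List.pyRange 1 (a.length : Int) 1).map (fun j =>
      PySem.Int.floordiv (p * pvGete row j.toNat - pvGete row 0 * pvGete (pvGetr a 0) j.toNat) prev))

/-- `[a[r]] + a[1:r] + [a[0]] + a[r+1:]`. -/
def pvSwapB (a : List (List Int)) (r : Nat) : List (List Int) :=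
  [pvGetr a r] ++ PySem.List.slice a (some 1) (some (r : Int)) ++ [pvGetr a 0]
    ++ PySem.List.slice a (some ((r : Int) + 1)) none

/-- port of `cond_det` (recursive fraction-free condensation); `fuel` is a
    totalisation guard only, never exhausted on the calls B makes. -/
def pvCondDet : Nat → List (List Int) → Int → Int
  | 0, _, _ => 0
  | fuel + 1, a, prev =>
    if a.length = 1 then pvGete (pvGetr a 0) 0
    else
      let p := pvGete (pvGetr a 0) 0
      if p = 0 then
        match (PySem.List.pyRange 1 (a.length : Int) 1).find?
            (fun r => pvGete (pvGetr a r.toNat) 0 != 0) with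
        | none => 0
        | some r => -(pvCondDet fuel (pvSwapB a r.toNat) prev)
      else pvCondDet fuel (pvChioNext a p prev) p

/-- `subs = [[]]; for x in pool: subs = subs + [s + [x] for s in subs]`. -/
def pvPowerset (pool : List Int) : List (List Int) :=
  pool.foldl (fun subs x => subs ++ subs.map (fun s => s ++ [x])) [[]]

/-- `[s for s in subs if len(s) == k]`. -/
def pvSized (r : Nat) (subs : List (List Int)) : List (List Int) :=
  subs.filter (fun s => s.length == r)

def determinantal_divisor_alt (matrix : List (List Int)) (k : Int) : Int :=
  if k = 0 then 1
  else
    let m : Int := (matrix.length : Int)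
    let n : Int := if matrix = [] then 0 else ((matrix.headD []).length : Int)
    if k > m ∨ k > n then 0
    else
      let dets := (pvSized k.toNat (pvPowerset (PySem.List.pyRange 0 m 1))).flatMap
        (fun rows => (pvSized k.toNat (pvPowerset (PySem.List.pyRange 0 n 1))).map
          (fun cols => pvCondDet (2 * rows.length + 1)
            (rows.map (fun r => cols.map (fun c => pvGete (pvGetr matrix r.toNat) c.toNat))) 1))
      dets.foldl (fun g d => (Int.gcd g d : Int)) 0

-- ===== PRECONDITION & SPEC =====

-- Pre_ excludes k < 0 (Python A raises ValueError in itertools.combinations) and, when the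
-- minor enumeration is actually entered, ragged matrices with a row shorter than the first
-- row (whether A returns early or raises IndexError there depends on the accidental
-- enumeration order).
def Pre_determinantal_divisor (matrix : List (List Int)) (k : Int) : Prop :=
  0 ≤ k ∧ (k = 0 ∨ (matrix.length : Int) < k ∨ (((matrix.headD []).length : Int) < k) ∨
    ∀ row ∈ matrix, (matrix.headD []).length ≤ row.length)

instance (matrix : List (List Int)) (k : Int) : Decidable (Pre_determinantal_divisor matrix k) := by
  unfold Pre_determinantal_divisor; infer_instance

def pvWitness_determinantal_divisor : List (List Int) × Int := ([[2, 4], [6, 8]], 1)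

def Spec_determinantal_divisor (matrix : List (List Int)) (k : Int) (out : Int) : Prop :=
  out = determinantal_divisor_alt matrix k
instance (matrix : List (List Int)) (k : Int) (out : Int) : Decidable (Spec_determinantal_divisor matrix k out) := by
  unfold Spec_determinantal_divisor; infer_instance

-- ===== CLAIM (what is proved, stated in full; the proofs are below) =====
def Claim_equal_determinantal_divisor : Prop := ∀ (matrix : List (List Int)) (k : Int), Dom_determinantal_divisor matrix k → Pre_determinantal_divisor matrix k → Spec_determinantal_divisor matrix k (determinantal_divisor matrix k)

-- ===== LEMMAS AND PROOFS =====

-- gcd-fold algebra -------------------------------------------------------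

def pvGstep (g d : Int) : Int := (Int.gcd g d : Int)

def pvGfold (g : Int) (l : List Int) : Int := l.foldl pvGstep g

theorem pvGstep_one (d : Int) : pvGstep 1 d = 1 := by
  simp [pvGstep, Int.gcd]

theorem pvGfold_one (l : List Int) : pvGfold 1 l = 1 := by
  induction l with
  | nil => rfl
  | cons x xs ih => simpa [pvGfold, pvGstep_one] using ih


theorem pvGstep_abs (g d : Int) : pvGstep g ((d.natAbs : Int)) = pvGstep g d := by
  simp [pvGstep, Int.gcd, Int.natAbs_abs]

theorem pvGstep_assoc (g h x : Int) : pvGstep (pvGstep g h) x = pvGstep g (pvGstep h x) := by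
  simp [pvGstep, Int.gcd, Nat.gcd_assoc]

theorem pvGstep_comm (a b : Int) : pvGstep a b = pvGstep b a := by
  simp [pvGstep, Int.gcd_comm]

theorem pvGstep_rightComm (g a b : Int) : pvGstep (pvGstep g a) b = pvGstep (pvGstep g b) a := by
  rw [pvGstep_assoc, pvGstep_assoc, pvGstep_comm a b]

theorem pvGfold_append (g : Int) (l1 l2 : List Int) :
    pvGfold g (l1 ++ l2) = pvGfold (pvGfold g l1) l2 := by
  simp [pvGfold]


theorem pvGfold_abs (g : Int) (l : List Int) :
    pvGfold g (l.map (fun d => ((d.natAbs : Int)))) = pvGfold g l := by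
  induction l generalizing g with
  | nil => rfl
  | cons x xs ih =>
    show pvGfold (pvGstep g ((x.natAbs : Int))) _ = pvGfold (pvGstep g x) xs
    rw [pvGstep_abs, ih]

theorem pvGfold_perm {l1 l2 : List Int} (h : l1.Perm l2) :
    ∀ g, pvGfold g l1 = pvGfold g l2 := by
  induction h with
  | nil => intro g; rfl
  | cons x _ ih => intro g; exact ih (pvGstep g x)
  | swap x y l =>
    intro g
    show pvGfold (pvGstep (pvGstep g y) x) l = pvGfold (pvGstep (pvGstep g x) y) l
    rw [pvGstep_rightComm]
  | trans _ _ ih1 ih2 => intro g; rw [ih1, ih2]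


-- combinations ------------------------------------------------------------

theorem pvCombos_len_mem : ∀ (l : List Int) (r : Nat) (e : List Int),
    e ∈ pvCombos l r → e.length = r := by
  intro l
  induction l with
  | nil => intro r e he; cases r with
    | zero => simp [pvCombos] at he; simp [he]
    | succ r => simp [pvCombos] at he
  | cons x xs ih =>
    intro r e he
    cases r with
    | zero => simp [pvCombos] at he; simp [he]
    | succ r =>
      simp only [pvCombos, List.mem_append, List.mem_map] at he
      rcases he with ⟨c, hc, rfl⟩ | he
      · simp [ih _ _ hc]
      · exact ih _ _ he

theorem pvCombos_zero (l : List Int) : pvCombos l 0 = [[]] := by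
  cases l <;> rfl

-- powerset-filter enumeration vs lexicographic combinations ----------------

theorem pvPerm4 {α : Type} (a b c d : List α) :
    ((a ++ b) ++ (c ++ d)).Perm ((a ++ c) ++ (b ++ d)) := by
  have h : ((b ++ c) ++ d).Perm ((c ++ b) ++ d) :=
    (List.perm_append_comm).append_right d
  simp only [List.append_assoc] at h ⊢
  exact h.append_left a

theorem pvCombos_snoc : ∀ (l : List Int) (x : Int) (r : Nat),
    (pvCombos (l ++ [x]) (r + 1)).Perm
      (pvCombos l (r + 1) ++ (pvCombos l r).map (fun c => c ++ [x])) := by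
  intro l
  induction l with
  | nil =>
    intro x r
    cases r with
    | zero => simp [pvCombos]
    | succ r => simp [pvCombos]
  | cons y l' ih =>
    intro x r
    cases r with
    | zero =>
      show ((pvCombos (l' ++ [x]) 0).map (fun c => y :: c) ++ pvCombos (l' ++ [x]) 1).Perm _
      rw [pvCombos_zero]
      have h1 := ih x 0
      rw [pvCombos_zero] at h1
      show ([[y]] ++ pvCombos (l' ++ [x]) 1).Perm
        (((pvCombos l' 0).map (fun c => y :: c) ++ pvCombos l' 1) ++
          (pvCombos (y :: l') 0).map (fun c => c ++ [x]))
      rw [pvCombos_zero, pvCombos_zero]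
      calc ([[y]] ++ pvCombos (l' ++ [x]) 1).Perm
            ([[y]] ++ (pvCombos l' 1 ++ [[x]])) := h1.append_left _
        _ = ([[y]] ++ pvCombos l' 1) ++ [[x]] := by simp
        _ = (([[]].map (fun c => y :: c)) ++ pvCombos l' 1) ++ [[]].map (fun c => c ++ [x]) := by simp
    | succ r' =>
      show ((pvCombos (l' ++ [x]) (r' + 1)).map (fun c => y :: c)
            ++ pvCombos (l' ++ [x]) (r' + 2)).Perm
          ((((pvCombos l' (r' + 1)).map (fun c => y :: c)) ++ pvCombos l' (r' + 2))
            ++ ((pvCombos l' r').map (fun c => y :: c) ++ pvCombos l' (r' + 1)).map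
                (fun c => c ++ [x]))
      have step := ((ih x r').map (fun c => y :: c)).append (ih x (r' + 1))
      refine step.trans ?_
      simp only [List.map_append, List.map_map]
      have hf : ((fun c => y :: c) ∘ fun c => c ++ [x])
          = ((fun c => c ++ [x]) ∘ fun c => y :: c) := by
        funext c; simp
      rw [hf]
      exact pvPerm4 _ _ _ _

theorem pvPowerset_snoc (l : List Int) (x : Int) :
    pvPowerset (l ++ [x]) = pvPowerset l ++ (pvPowerset l).map (fun s => s ++ [x]) := by
  simp [pvPowerset]

theorem pvSized_append (r : Nat) (S T : List (List Int)) :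
    pvSized r (S ++ T) = pvSized r S ++ pvSized r T := by
  simp [pvSized]

theorem pvSized_map_snoc (r : Nat) (S : List (List Int)) (x : Int) :
    pvSized (r + 1) (S.map (fun s => s ++ [x])) = (pvSized r S).map (fun s => s ++ [x]) := by
  simp only [pvSized, List.filter_map]
  congr 1
  apply List.filter_congr
  intro s _
  simp

theorem pvSized_zero_map_snoc (S : List (List Int)) (x : Int) :
    pvSized 0 (S.map (fun s => s ++ [x])) = [] := by
  simp [pvSized, List.filter_map, List.filter_eq_nil_iff]

theorem pvSizedPow : ∀ (l : List Int) (r : Nat),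
    (pvSized r (pvPowerset l)).Perm (pvCombos l r) := by
  intro l
  induction l using List.reverseRecOn with
  | nil =>
    intro r
    cases r with
    | zero => simp [pvPowerset, pvSized, pvCombos]
    | succ r => simp [pvPowerset, pvSized, pvCombos]
  | append_singleton l' x ih =>
    intro r
    rw [pvPowerset_snoc, pvSized_append]
    cases r with
    | zero =>
      rw [pvSized_zero_map_snoc, pvCombos_zero]
      have h0 := ih 0
      rw [pvCombos_zero] at h0
      simpa using h0
    | succ r' =>
      rw [pvSized_map_snoc]
      exact ((ih (r' + 1)).append ((ih r').map _)).trans (pvCombos_snoc l' x r').symm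

-- determinant equivalence: infrastructure --------------------------------

def pvTrail (k : Nat) (a : List (List Int)) : List (List Int) :=
  (a.drop k).map (fun row => row.drop k)

theorem pvGete_eq_getElem (l : List Int) (i : Nat) (h : i < l.length) :
    pvGete l i = l[i] := by
  simp [pvGete, List.getD_eq_getElem?_getD, List.getElem?_eq_getElem h]

theorem pvGetr_eq_getElem (a : List (List Int)) (i : Nat) (h : i < a.length) :
    pvGetr a i = a[i] := by
  simp [pvGetr, List.getD_eq_getElem?_getD, List.getElem?_eq_getElem h]

theorem pvGete_drop (l : List Int) (k j : Nat) : pvGete (l.drop k) j = pvGete l (k + j) := by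
  simp [pvGete, List.getD_eq_getElem?_getD, List.getElem?_drop]

theorem pvGetr_trail (k : Nat) (a : List (List Int)) (i : Nat) :
    pvGetr (pvTrail k a) i = (pvGetr a (k + i)).drop k := by
  simp only [pvGetr, pvTrail, List.getD_eq_getElem?_getD, List.getElem?_map, List.getElem?_drop]
  cases h : a[k + i]? <;> simp

theorem pvTrail_get (k : Nat) (a : List (List Int)) (i j : Nat) :
    pvGete (pvGetr (pvTrail k a) i) j = pvGete (pvGetr a (k + i)) (k + j) := by
  rw [pvGetr_trail, pvGete_drop]

theorem pvTrail_length (k : Nat) (a : List (List Int)) :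
    (pvTrail k a).length = a.length - k := by
  simp [pvTrail]

theorem pvElim_length (a : List (List Int)) (k : Nat) (p q : Int) :
    (pvElimStep a k p q).length = a.length := by
  simp [pvElimStep]

theorem pvZero_length (a : List (List Int)) (k : Nat) :
    (pvZeroCol a k).length = a.length := by
  simp [pvZeroCol]

theorem pvSwap_length (a : List (List Int)) (i j : Nat) :
    (pvSwap a i j).length = a.length := by
  simp [pvSwap]

theorem pvElim_get (a : List (List Int)) (k : Nat) (p q : Int) (i : Nat) (h : i < a.length) :
    (pvElimStep a k p q)[i]'(by rw [pvElim_length]; exact h) =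
      if k < i then
        (a[i]).mapIdx (fun j x =>
          if k < j then PySem.Int.floordiv (x * p - pvGete a[i] k * pvGete (pvGetr a k) j) q
          else x)
      else a[i] := by
  simp [pvElimStep, List.getElem_mapIdx]

theorem pvZero_get (a : List (List Int)) (k : Nat) (i : Nat) (h : i < a.length) :
    (pvZeroCol a k)[i]'(by rw [pvZero_length]; exact h) =
      if k < i then (a[i]).set k 0 else a[i] := by
  simp [pvZeroCol, List.getElem_mapIdx]

theorem pvSwap_get (a : List (List Int)) (r s : Nat) (hr : r < a.length) (hs : s < a.length)
    (i : Nat) (h : i < a.length) :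
    (pvSwap a r s)[i]'(by rw [pvSwap_length]; exact h) =
      if s = i then a[r] else if r = i then a[s] else a[i] := by
  simp only [pvSwap, List.getElem_set]
  by_cases hsi : s = i <;> by_cases hri : r = i <;>
    simp [hsi, hri, pvGetr_eq_getElem _ _ hr, pvGetr_eq_getElem _ _ hs,
      pvGetr_eq_getElem _ _ h]

theorem pvSq_elimzero (a : List (List Int)) (k : Nat) (p q : Int)
    (hsq : ∀ row ∈ a, row.length = a.length) :
    ∀ row ∈ pvZeroCol (pvElimStep a k p q) k, row.length = (pvZeroCol (pvElimStep a k p q) k).length := by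
  intro row hrow
  rw [pvZero_length, pvElim_length]
  simp only [pvZeroCol, List.mem_mapIdx] at hrow
  obtain ⟨i, hi, hrow⟩ := hrow
  rw [pvElim_length] at hi
  rw [pvElim_get a k p q i hi] at hrow
  subst hrow
  have hlen : a[i].length = a.length := hsq _ (List.getElem_mem hi)
  split_ifs <;> simp [hlen]

theorem pvSq_swap (a : List (List Int)) (r s : Nat) (hr : r < a.length) (hs : s < a.length)
    (hsq : ∀ row ∈ a, row.length = a.length) :
    ∀ row ∈ pvSwap a r s, row.length = (pvSwap a r s).length := by
  intro row hrow
  rw [pvSwap_length]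
  rw [List.mem_iff_getElem] at hrow
  obtain ⟨i, hi, hrow⟩ := hrow
  rw [pvSwap_length] at hi
  rw [pvSwap_get a r s hr hs i hi] at hrow
  subst hrow
  split_ifs
  · exact hsq _ (List.getElem_mem hr)
  · exact hsq _ (List.getElem_mem hs)
  · exact hsq _ (List.getElem_mem hi)

theorem pvTrail_getElem (j : Nat) (X : List (List Int)) (i : Nat) (h : i < (pvTrail j X).length) :
    (pvTrail j X)[i] = (X[j + i]'(by simp [pvTrail] at h; omega)).drop j := by
  simp [pvTrail, List.getElem_map, List.getElem_drop]

theorem pvTrail_step (a : List (List Int)) (k : Nat) (p prev : Int)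
    (hsq : ∀ row ∈ a, row.length = a.length) (hk : k + 2 ≤ a.length) :
    pvTrail (k+1) (pvZeroCol (pvElimStep a k p prev) k) = pvChioNext (pvTrail k a) p prev := by
  have htl : (pvTrail k a).length = a.length - k := pvTrail_length k a
  have hLen : (pvTrail (k+1) (pvZeroCol (pvElimStep a k p prev) k)).length = a.length - (k+1) := by
    rw [pvTrail_length, pvZero_length, pvElim_length]
  have hRLen : (pvChioNext (pvTrail k a) p prev).length = a.length - (k+1) := by
    simp [pvChioNext, PySem.List.slice_from_one, htl]
    omega
  apply List.ext_getElem (by omega)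
  intro i h1 h2
  rw [hLen] at h1
  -- LHS row
  rw [pvTrail_getElem]
  have hx : k + 1 + i < a.length := by omega
  have hZ : (pvZeroCol (pvElimStep a k p prev) k)[k + 1 + i]'(by rw [pvZero_length, pvElim_length]; exact hx)
      = (a[k+1+i].mapIdx (fun j x =>
          if k < j then PySem.Int.floordiv (x * p - pvGete a[k+1+i] k * pvGete (pvGetr a k) j) prev
          else x)).set k 0 := by
    rw [pvZero_get _ _ _ (by rw [pvElim_length]; exact hx)]
    rw [pvElim_get a k p prev _ hx]
    rw [if_pos (by omega), if_pos (by omega)]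
  rw [hZ]
  rw [List.drop_set_of_lt (by omega)]
  simp only [pvChioNext, PySem.List.slice_from_one, List.getElem_map, List.getElem_tail]
  have hrlen : a[k+1+i].length = a.length := hsq _ (List.getElem_mem hx)
  apply List.ext_getElem
  · simp [hrlen, PySem.List.length_pyRange_one, htl]
    omega
  · intro j hj1 hj2
    have hjlt : j < a.length - (k+1) := by
      simp [hrlen] at hj1; omega
    rw [List.getElem_drop, List.getElem_mapIdx, if_pos (by omega : k < k + 1 + j)]
    rw [List.getElem_map, PySem.List.getElem_pyRange_one]
    have htn : ((1:Int) + (j:Int)).toNat = 1 + j := by omega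
    have hti : i + 1 < (pvTrail k a).length := by rw [htl]; omega
    rw [← pvGetr_eq_getElem _ _ hti, htn, pvGetr_trail, pvGete_drop, pvGete_drop, pvGetr_trail,
      pvGete_drop]
    rw [pvGetr_eq_getElem a (k + (i+1)) (by omega)]
    rw [pvGetr_eq_getElem a (k + 0) (by omega)]
    rw [← pvGete_eq_getElem a[k+1+i] (k+1+j) (by omega)]
    have e1 : k + (i + 1) = k + 1 + i := by omega
    have e2 : k + (1 + j) = k + 1 + j := by omega
    have e3 : k + 0 = k := by omega
    simp only [e1, e2, e3]
    rw [← pvGetr_eq_getElem a k (by omega)]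
    congr 1
    ring

theorem pvRowCongr (a : List (List Int)) (k x y : Nat) (hx : x < a.length) (hy : y < a.length)
    (h : x = y) : List.drop k (a[x]'hx) = List.drop k (a[y]'hy) := by
  subst h; rfl

theorem pvTrail_swap (a : List (List Int)) (k r : Nat) (hkr : k < r) (hr : r < a.length) :
    pvTrail k (pvSwap a k r) = pvSwapB (pvTrail k a) (r - k) := by
  have htl : (pvTrail k a).length = a.length - k := pvTrail_length k a
  have hs1 : 1 ≤ r - k := by omega
  have hs2 : r - k < (pvTrail k a).length := by omega
  have hsw : pvSwapB (pvTrail k a) (r - k)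
      = pvGetr (pvTrail k a) (r - k) :: ((((pvTrail k a).drop 1).take (r - k - 1))
        ++ pvGetr (pvTrail k a) 0 :: (pvTrail k a).drop (r - k + 1)) := by
    rw [pvSwapB, PySem.List.slice_toNat _ (by omega) (by omega),
      PySem.List.slice_from _ (by omega)]
    have e1 : ((1:Int)).toNat = 1 := rfl
    have e2 : (((r - k : Nat) : Int)).toNat = r - k := by omega
    have e3 : (((r - k : Nat) : Int) + 1).toNat = r - k + 1 := by omega
    rw [e1, e2, e3]
    simp [List.append_assoc]
  rw [hsw]
  have hB : ((((pvTrail k a).drop 1)).take (r - k - 1)).length = r - k - 1 := by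
    rw [List.length_take, List.length_drop]; omega
  have hLen : (pvTrail k (pvSwap a k r)).length = a.length - k := by
    rw [pvTrail_length, pvSwap_length]
  apply List.ext_getElem
  · rw [hLen, List.length_cons, List.length_append, hB, List.length_cons, List.length_drop, htl]
    omega
  · intro i h1 h2
    rw [hLen] at h1
    rw [pvTrail_getElem, pvSwap_get a k r (by omega) hr _ (by omega)]
    cases i with
    | zero =>
      rw [if_neg (by omega : ¬ r = k + 0), if_pos (by omega : k = k + 0)]
      rw [List.getElem_cons_zero, pvGetr_eq_getElem _ _ hs2, pvTrail_getElem]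
      exact pvRowCongr a k _ _ _ _ (by omega)
    | succ i' =>
      rw [List.getElem_cons_succ]
      simp only [List.getElem_append, hB]
      split_ifs with hA hC hK hC2 hC3
      · omega
      · have h0 : i' - (r - k - 1) = 0 := by omega
        simp only [h0, List.getElem_cons_zero]
        rw [pvGetr_eq_getElem _ _ (by omega : 0 < (pvTrail k a).length), pvTrail_getElem]
        exact pvRowCongr a k _ _ _ _ (by omega)
      · omega
      · omega
      · rw [List.getElem_take, List.getElem_drop, pvTrail_getElem]
        exact pvRowCongr a k _ _ _ _ (by omega)
      · obtain ⟨j, hj⟩ : ∃ j, i' - (r - k - 1) = j + 1 := ⟨i' - (r - k - 1) - 1, by omega⟩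
        simp only [hj, List.getElem_cons_succ]
        rw [List.getElem_drop, pvTrail_getElem]
        exact pvRowCongr a k _ _ _ _ (by omega)

theorem pvFind?_congr {α : Type} (p q : α → Bool) :
    ∀ (l : List α), (∀ a ∈ l, p a = q a) → l.find? p = l.find? q := by
  intro l
  induction l with
  | nil => intro _; rfl
  | cons x xs ih =>
    intro h
    rw [List.find?_cons, List.find?_cons, h x List.mem_cons_self]
    cases q x
    · exact ih (fun a ha => h a (List.mem_cons_of_mem _ ha))
    · rfl

theorem pvFind_corr (a : List (List Int)) (k : Nat) :
    pvFindSwap a k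
      = ((PySem.List.pyRange 1 ((pvTrail k a).length : Int) 1).find?
          (fun r => pvGete (pvGetr (pvTrail k a) r.toNat) 0 != 0)).map (fun r => r + (k : Int)) := by
  rw [pvFindSwap, PySem.List.pyRange_one, PySem.List.pyRange_one, List.find?_map, List.find?_map]
  have hlen : ((a.length : Int) - ((k:Int)+1)).toNat = ((((pvTrail k a).length : Int)) - 1).toNat := by
    rw [pvTrail_length]; omega
  rw [hlen]
  rw [pvFind?_congr (((fun r => pvGete (pvGetr a r.toNat) k != 0)) ∘ (fun t : Nat => ((k:Int)+1) + (t:Int)))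
      ((fun r => pvGete (pvGetr (pvTrail k a) r.toNat) 0 != 0) ∘ (fun t : Nat => (1:Int) + (t:Int)))
      (List.range ((((pvTrail k a).length : Int)) - 1).toNat) ?hp]
  case hp =>
    intro t _
    simp only [Function.comp]
    have e1 : (((k:Int)+1) + (t:Int)).toNat = k + (1 + t) := by omega
    have e2 : ((1:Int) + (t:Int)).toNat = 1 + t := by omega
    rw [e1, e2, pvTrail_get k a (1+t) 0]
    simp
  rw [Option.map_map]
  congr 1
  funext t
  simp only [Function.comp]
  ring

theorem pvGetr_swap_at (a : List (List Int)) (k j : Nat) (hk : k < a.length) (hj : j < a.length)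
    (hne : j ≠ k) : pvGetr (pvSwap a k j) k = pvGetr a j := by
  rw [pvGetr_eq_getElem _ k (by rw [pvSwap_length]; exact hk),
    pvSwap_get a k j hk hj k hk, if_neg hne, if_pos rfl, pvGetr_eq_getElem _ _ hj]

theorem pvCondDet_succ_ne (f : Nat) (T : List (List Int)) (prev : Int)
    (h1 : T.length ≠ 1) (h2 : pvGete (pvGetr T 0) 0 ≠ 0) :
    pvCondDet (f+1) T prev
      = pvCondDet f (pvChioNext T (pvGete (pvGetr T 0) 0) prev) (pvGete (pvGetr T 0) 0) := by
  simp [pvCondDet, h1, h2]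

theorem pvCondDet_succ_zero (f : Nat) (T : List (List Int)) (prev : Int)
    (h1 : T.length ≠ 1) (h2 : pvGete (pvGetr T 0) 0 = 0) :
    pvCondDet (f+1) T prev
      = (match (PySem.List.pyRange 1 (T.length : Int) 1).find?
            (fun r => pvGete (pvGetr T r.toNat) 0 != 0) with
        | none => 0
        | some r => -(pvCondDet f (pvSwapB T r.toNat) prev)) := by
  simp [pvCondDet, h1, h2]

theorem pvBarLoop_succ_nz (s k : Nat) (a : List (List Int)) (sign prev : Int)
    (hz : ¬ pvGete (pvGetr a k) k = 0) :
    pvBarLoop (s+1) k a sign prev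
      = pvBarLoop s (k+1) (pvZeroCol (pvElimStep a k (pvGete (pvGetr a k) k) prev) k) sign
          (pvGete (pvGetr a k) k) := by
  simp [pvBarLoop, hz]

theorem pvBarLoop_succ_z (s k : Nat) (a : List (List Int)) (sign prev : Int)
    (hz : pvGete (pvGetr a k) k = 0) :
    pvBarLoop (s+1) k a sign prev
      = (match pvFindSwap a k with
        | none => 0
        | some r =>
          pvBarLoop s (k+1)
            (pvZeroCol (pvElimStep (pvSwap a k r.toNat) k
              (pvGete (pvGetr (pvSwap a k r.toNat) k) k) prev) k) (-sign)
            (pvGete (pvGetr (pvSwap a k r.toNat) k) k)) := by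
  simp [pvBarLoop, hz]

theorem pvBar_cond : ∀ (s : Nat) (a : List (List Int)) (k : Nat) (sign prev : Int) (fuel : Nat),
    a.length = k + s + 1 → (∀ row ∈ a, row.length = a.length) → 2 * s + 2 ≤ fuel →
    pvBarLoop s k a sign prev = sign * pvCondDet fuel (pvTrail k a) prev := by
  intro s
  induction s with
  | zero =>
    intro a k sign prev fuel hlen hsq hfuel
    obtain ⟨f, rfl⟩ : ∃ f, fuel = f + 1 := ⟨fuel - 1, by omega⟩
    have hT : (pvTrail k a).length = 1 := by rw [pvTrail_length]; omega
    show sign * pvGete (pvGetr a (a.length - 1)) (a.length - 1) = _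
    simp only [pvCondDet, hT, if_true]
    rw [pvTrail_get k a 0 0]
    have e : a.length - 1 = k + 0 := by omega
    rw [e]
  | succ s ih =>
    intro a k sign prev fuel hlen hsq hfuel
    obtain ⟨f, rfl⟩ : ∃ f, fuel = f + 1 := ⟨fuel - 1, by omega⟩
    have hT : (pvTrail k a).length = s + 2 := by rw [pvTrail_length]; omega
    have hkk : k < a.length := by omega
    have hp0 : pvGete (pvGetr (pvTrail k a) 0) 0 = pvGete (pvGetr a k) k := by
      rw [pvTrail_get k a 0 0]; simp
    by_cases hz : pvGete (pvGetr a k) k = 0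
    · rw [pvBarLoop_succ_z s k a sign prev hz, pvFind_corr,
        pvCondDet_succ_zero f _ prev (by omega) (by rw [hp0]; exact hz)]
      cases hfind : (PySem.List.pyRange 1 ((pvTrail k a).length : Int) 1).find?
          (fun r => pvGete (pvGetr (pvTrail k a) r.toNat) 0 != 0) with
      | none => simp
      | some r =>
        have hmem := List.mem_of_find?_eq_some hfind
        have hpred := List.find?_some hfind
        rw [PySem.List.mem_pyRange_one] at hmem
        obtain ⟨hr1, hr2⟩ := hmem
        have hrnz : pvGete (pvGetr (pvTrail k a) r.toNat) 0 ≠ 0 := by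
          simpa using hpred
        have hs01 : 1 ≤ r.toNat := by omega
        have hs02 : r.toNat < (pvTrail k a).length := by
          rw [pvTrail_length]; rw [pvTrail_length] at hr2; omega
        have hsa : k + r.toNat < a.length := by
          rw [pvTrail_length] at hs02; omega
        have htnk : (r + (k : Int)).toNat = k + r.toNat := by omega
        simp only [Option.map_some]
        show pvBarLoop s (k+1)
            (pvZeroCol (pvElimStep (pvSwap a k (r + (k:Int)).toNat) k
              (pvGete (pvGetr (pvSwap a k (r + (k:Int)).toNat) k) k) prev) k) (-sign)
            (pvGete (pvGetr (pvSwap a k (r + (k:Int)).toNat) k) k)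
          = sign * -(pvCondDet f (pvSwapB (pvTrail k a) r.toNat) prev)
        rw [htnk]
        have hswlen : (pvSwap a k (k + r.toNat)).length = a.length := pvSwap_length a _ _
        have hsqsw := pvSq_swap a k (k + r.toNat) hkk hsa hsq
        have htsw : pvTrail k (pvSwap a k (k + r.toNat)) = pvSwapB (pvTrail k a) r.toNat := by
          have h := pvTrail_swap a k (k + r.toNat) (by omega) hsa
          rw [h]
          congr 1
          omega
        have hpivr : pvGetr (pvSwap a k (k + r.toNat)) k = pvGetr a (k + r.toNat) :=
          pvGetr_swap_at a k (k + r.toNat) hkk hsa (by omega)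
        have hpivv : pvGete (pvGetr (pvSwap a k (k + r.toNat)) k) k
            = pvGete (pvGetr (pvTrail k a) r.toNat) 0 := by
          rw [hpivr, pvTrail_get k a r.toNat 0]
          simp
        obtain ⟨f', rfl⟩ : ∃ f', f = f' + 1 := ⟨f - 1, by omega⟩
        rw [← htsw]
        have hhead : pvGete (pvGetr (pvTrail k (pvSwap a k (k + r.toNat))) 0) 0
            = pvGete (pvGetr (pvSwap a k (k + r.toNat)) k) k := by
          rw [pvTrail_get k _ 0 0]; simp
        rw [pvCondDet_succ_ne f' (pvTrail k (pvSwap a k (k + r.toNat))) prev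
          (by rw [pvTrail_length, hswlen]; omega)
          (by rw [hhead, hpivv]; exact hrnz), hhead]
        have hsqsw' : ∀ row ∈ pvSwap a k (k + r.toNat), row.length = (pvSwap a k (k + r.toNat)).length := hsqsw
        rw [← pvTrail_step (pvSwap a k (k + r.toNat)) k
          (pvGete (pvGetr (pvSwap a k (k + r.toNat)) k) k) prev hsqsw' (by rw [hswlen]; omega)]
        rw [ih (pvZeroCol (pvElimStep (pvSwap a k (k + r.toNat)) k
            (pvGete (pvGetr (pvSwap a k (k + r.toNat)) k) k) prev) k) (k+1) (-sign)
            (pvGete (pvGetr (pvSwap a k (k + r.toNat)) k) k) f'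
            (by rw [pvZero_length, pvElim_length, hswlen]; omega)
            (pvSq_elimzero (pvSwap a k (k + r.toNat)) k
              (pvGete (pvGetr (pvSwap a k (k + r.toNat)) k) k) prev hsqsw')
            (by omega)]
        ring
    · rw [pvBarLoop_succ_nz s k a sign prev hz]
      rw [pvCondDet_succ_ne f _ prev (by omega) (by rw [hp0]; exact hz), hp0]
      rw [← pvTrail_step a k (pvGete (pvGetr a k) k) prev hsq (by omega)]
      exact ih _ (k+1) sign _ f (by simp [pvZero_length, pvElim_length]; omega)
        (pvSq_elimzero a k _ prev hsq) (by omega)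

-- the determinant equivalence ---------------------------------------------

theorem pvDetBareiss_eq_condDet (a : List (List Int)) (h1 : 1 ≤ a.length)
    (hsq : ∀ row ∈ a, row.length = a.length) :
    pvDetBareiss a = pvCondDet (2 * a.length + 1) a 1 := by
  have hne : ¬ a.length = 0 := by omega
  have htr : pvTrail 0 a = a := by
    simp [pvTrail]
  rw [pvDetBareiss, if_neg hne]
  have hany : (a.any (fun row => row.length ≠ a.length)) = false := by
    rw [List.any_eq_false]
    intro row hrow
    simp [hsq row hrow]
  rw [hany]
  simp only [Bool.false_eq_true, if_false]
  have h := pvBar_cond (a.length - 1) a 0 1 1 (2 * a.length + 1) (by omega) hsq (by omega)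
  rw [h, one_mul, htr]

-- the common value of one minor ------------------------------------------

def pvBDet (matrix : List (List Int)) (rows cols : List Int) : Int :=
  pvCondDet (2 * rows.length + 1)
    (rows.map (fun r => cols.map (fun c => pvGete (pvGetr matrix r.toNat) c.toNat))) 1

theorem pvADet_eq (matrix : List (List Int)) (rows cols : List Int) (kk : Nat) (hk : 1 ≤ kk)
    (hr : rows.length = kk) (hc : cols.length = kk) :
    ((pvDetBareiss (pvKSub matrix rows cols)).natAbs : Int) = ((pvBDet matrix rows cols).natAbs : Int) := by
  have hlen : (pvKSub matrix rows cols).length = kk := by simp [pvKSub, hr]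
  have hsq : ∀ row ∈ pvKSub matrix rows cols, row.length = (pvKSub matrix rows cols).length := by
    intro row hrow
    simp only [pvKSub, List.mem_map] at hrow
    rcases hrow with ⟨r, _, rfl⟩
    simp [hlen, hc]
  have := pvDetBareiss_eq_condDet (pvKSub matrix rows cols) (by omega) hsq
  rw [this, hlen]
  simp [pvBDet, pvKSub, hr]

-- A-side: the double loop with early exit is the gcd-fold -----------------

theorem pvACols_spec (matrix : List (List Int)) (rows : List Int) :
    ∀ (cl : List (List Int)) (g : Int),
      (pvACols matrix rows cl g = .inl 1 ∧
        pvGfold g (cl.map (fun cols => ((pvDetBareiss (pvKSub matrix rows cols)).natAbs : Int))) = 1) ∨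
      pvACols matrix rows cl g =
        .inr (pvGfold g (cl.map (fun cols => ((pvDetBareiss (pvKSub matrix rows cols)).natAbs : Int)))) := by
  intro cl
  induction cl with
  | nil => intro g; right; rfl
  | cons cols rest ih =>
    intro g
    have hstep : pvACols matrix rows (cols :: rest) g
        = (if pvGstep g ((pvDetBareiss (pvKSub matrix rows cols)).natAbs : Int) = 1 then .inl 1
           else pvACols matrix rows rest
             (pvGstep g ((pvDetBareiss (pvKSub matrix rows cols)).natAbs : Int))) := rfl
    by_cases h1 : pvGstep g ((pvDetBareiss (pvKSub matrix rows cols)).natAbs : Int) = 1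
    · left
      refine ⟨by rw [hstep, if_pos h1], ?_⟩
      show pvGfold (pvGstep g _) _ = 1
      rw [h1, pvGfold_one]
    · rw [hstep, if_neg h1]
      exact ih _

theorem pvARows_eq (matrix : List (List Int)) (colsAll : List (List Int)) :
    ∀ (rl : List (List Int)) (g : Int),
      pvARows matrix colsAll rl g =
        pvGfold g (rl.flatMap (fun rows =>
          colsAll.map (fun cols => ((pvDetBareiss (pvKSub matrix rows cols)).natAbs : Int)))) := by
  intro rl
  induction rl with
  | nil => intro g; rfl
  | cons rows rest ih =>
    intro g
    rcases pvACols_spec matrix rows colsAll g with ⟨hl, hf⟩ | hr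
    · show (match pvACols matrix rows colsAll g with
        | .inl v => v | .inr g' => pvARows matrix colsAll rest g') = _
      rw [hl]
      rw [List.flatMap_cons, pvGfold_append, hf, pvGfold_one]
    · show (match pvACols matrix rows colsAll g with
        | .inl v => v | .inr g' => pvARows matrix colsAll rest g') = _
      rw [hr]
      show pvARows matrix colsAll rest
        (pvGfold g (colsAll.map (fun cols => ((pvDetBareiss (pvKSub matrix rows cols)).natAbs : Int)))) = _
      rw [ih, List.flatMap_cons, pvGfold_append]

-- B-side: the flat fold over the powerset-filtered enumeration -------------

theorem pvAlt_fold (dets : List Int) :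
    dets.foldl (fun g d => (Int.gcd g d : Int)) 0 = pvGfold 0 dets := rfl

-- top-level assembly -------------------------------------------------------

theorem pvMain_eq (matrix : List (List Int)) (k : Int) (hk : 0 ≤ k) :
    determinantal_divisor matrix k = determinantal_divisor_alt matrix k := by
  by_cases h0 : k = 0
  · simp [determinantal_divisor, determinantal_divisor_alt, h0]
  · have hk1 : 1 ≤ k := by omega
    have hkk1 : 1 ≤ k.toNat := by omega
    have hshape : pvMatrixShape matrix
        = ((matrix.length : Int), (if matrix = [] then (0:Int) else ((matrix.headD []).length : Int))) := by
      unfold pvMatrixShape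
      by_cases hnil : matrix = [] <;> simp [hnil]
    rw [determinantal_divisor, determinantal_divisor_alt, if_neg h0, if_neg h0, hshape]
    set m : Int := (matrix.length : Int) with hm
    set n : Int := (if matrix = [] then (0:Int) else ((matrix.headD []).length : Int)) with hn
    by_cases hg : k > m ∨ k > n
    · rw [if_pos hg, if_pos hg]
    · rw [if_neg hg, if_neg hg]
      set kk := k.toNat with hkkdef
      set rowCombos := pvCombos (PySem.List.pyRange 0 m 1) kk with hrc
      set colsAll := pvCombos (PySem.List.pyRange 0 n 1) kk with hca
      rw [pvARows_eq]
      -- replace each |bareiss| entry by |condDet| via pvADet_eq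
      have hentry : (rowCombos.flatMap (fun rows =>
            colsAll.map (fun cols => ((pvDetBareiss (pvKSub matrix rows cols)).natAbs : Int))))
          = (rowCombos.flatMap (fun rows =>
            colsAll.map (fun cols => pvBDet matrix rows cols))).map (fun d => ((d.natAbs : Int))) := by
        rw [List.map_flatMap]
        apply List.flatMap_congr
        intro rows hrows
        rw [List.map_map]
        apply List.map_congr_left
        intro cols hcols
        exact pvADet_eq matrix rows cols kk hkk1
          (pvCombos_len_mem _ _ _ hrows) (pvCombos_len_mem _ _ _ hcols)
      rw [hentry, pvGfold_abs]
      -- B's value is the same gcd fold over a permuted enumeration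
      rw [pvAlt_fold]
      apply pvGfold_perm
      refine ((pvSizedPow (PySem.List.pyRange 0 m 1) kk).flatMap ?_).symm
      intro rows _
      exact (pvSizedPow (PySem.List.pyRange 0 n 1) kk).map
        (fun cols => pvBDet matrix rows cols)

-- ===== VERDICT (by name: the statement is the Claim_ definition above) =====
theorem determinantal_divisor_spec : Claim_equal_determinantal_divisor := by
  intro matrix k _ hpre
  exact pvMain_eq matrix k hpre.1
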